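-- pv_equiv track=rewrite | github.com/baptistecottier/advents-of-code | events/year_2015/day_24/day_24.py | get_quantum_entanglement
-- ===== SOURCE A (Python) =====
-- from itertools import combinations
-- from math import prod
--
-- def get_quantum_entanglement(packages: list[int], groups: int) -> int:
--     """
--     Finds the minimal quantum entanglement for dividing packages into groups of equal weight.
--
--     Quantum entanglement is defined as the product of the weights in the first group of minimal
--     size.
--
--     Args:
--         packages (list[int]): List of package weights.
--         groups (int): Number of groups to divide the packages into.
--
--     Returns:
--         int: The minimal quantum entanglement for the first group.
--
--     Example:
--         >>> get_quantum_entanglement([1, 2, 3, 4, 5, 7, 8, 9, 10, 11], 3)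
--         99
--     """
--     target = sum(packages) // groups
--     size = 1
--     while True:
--         for package in combinations(packages, size):
--             if sum(package) == target:
--                 return prod(package)
--         size += 1
-- ===== SOURCE B (Python) =====
-- def get_quantum_entanglement(packages: list[int], groups: int) -> int:
--     """Memoized recursion over list positions: best(i, t) returns the (size, product)
--     of the minimal-size (ties broken by earliest indices, i.e. itertools order)
--     nonempty subset of packages[i:] summing to t, or None if there is none."""
--     target = sum(packages) // groups
--     n = len(packages)
--     memo = {}
--
--     def best(i, t):
--         if i == n:
--             return None
--         if (i, t) in memo:
--             return memo[(i, t)]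
--         x = packages[i]
--         if t == x:
--             w = (1, x)
--         else:
--             r = best(i + 1, t - x)
--             w = None if r is None else (r[0] + 1, x * r[1])
--         wo = best(i + 1, t)
--         if w is None:
--             res = wo
--         elif wo is None or w[0] <= wo[0]:
--             res = w
--         else:
--             res = wo
--         memo[(i, t)] = res
--         return res
--
--     r = best(0, target)
--     if r is None:
--         raise ValueError("no nonempty subset sums to the target")
--     return r[1]
-- ===== Notes on version B (the rewrite author's own statement) =====
-- stated objective: alternative
-- what changed: A enumerates itertools.combinations size by size until one sums to the target; B replaces the generate-and-test enumeration with one memoized recursion over list positions that computes, for each (position, remaining sum), the minimal-size (itertools-order-first) subset's (size, product) directly, sharing overlapping subproblems instead of re-scanning combinations.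
import Mathlib
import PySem

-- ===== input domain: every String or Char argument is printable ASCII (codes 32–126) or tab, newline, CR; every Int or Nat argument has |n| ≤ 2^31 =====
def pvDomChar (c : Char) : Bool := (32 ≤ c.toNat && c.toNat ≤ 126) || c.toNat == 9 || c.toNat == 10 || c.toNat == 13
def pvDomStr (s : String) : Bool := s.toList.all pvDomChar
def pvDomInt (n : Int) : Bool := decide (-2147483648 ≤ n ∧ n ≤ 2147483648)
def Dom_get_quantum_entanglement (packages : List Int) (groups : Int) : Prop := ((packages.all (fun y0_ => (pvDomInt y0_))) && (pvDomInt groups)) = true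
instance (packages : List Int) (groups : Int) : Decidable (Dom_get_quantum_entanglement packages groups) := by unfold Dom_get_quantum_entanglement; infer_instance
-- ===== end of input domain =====

-- ===== PORT A =====
-- B changes the algorithm (memoized positional recursion instead of size-by-size
-- combination enumeration); similar cost, genuinely different structure ("alternative").

-- Python's itertools.combinations(xs, k), in its exact emission order.
def pvCombos : Nat → List Int → List (List Int)
  | 0, _ => [[]]
  | _ + 1, [] => []
  | k + 1, x :: xs => ((pvCombos k xs).map (fun l => x :: l)) ++ pvCombos (k + 1) xs

-- the inner 'for package in combinations(...): if sum == target: return prod'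
def pvFind (xs : List Int) (k : Nat) (t : Int) : Option (List Int) :=
  (pvCombos k xs).find? (fun l => l.sum == t)

-- A's 'while True: ... size += 1'.  Python loops forever when no combination ever
-- matches; since combinations(xs, k) is empty for k > len(xs), fuel = len(xs)
-- suffices on every input on which Python returns (Pre_ below); 0 is the
-- out-of-fuel placeholder, never reached inside Pre_.
def pvLoopA (xs : List Int) (t : Int) : Nat → Nat → Int
  | 0, _ => 0
  | fuel + 1, size =>
    match pvFind xs size t with
    | some l => l.prod
    | none => pvLoopA xs t fuel (size + 1)

def get_quantum_entanglement (packages : List Int) (groups : Int) : Int :=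
  pvLoopA packages (PySem.Int.floordiv packages.sum groups) packages.length 1

-- ===== PORT B =====
-- Source B's best(i, t) recursion over positions (the Python memo dict is a pure
-- caching device and is dropped; the recursion structure is identical):
-- minimal (size, then itertools-order) nonempty subset of the suffix summing to t,
-- as (size, product), none if there is none.
def pvBest : List Int → Int → Option (Nat × Int)
  | [], _ => none
  | x :: xs, t =>
    let w : Option (Nat × Int) :=
      if t = x then some (1, x)
      else (pvBest xs (t - x)).map (fun r => (r.1 + 1, x * r.2))
    match w, pvBest xs t with
    | none, wo => wo
    | some a, none => some a
    | some a, some b => if a.1 ≤ b.1 then some a else some b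

def get_quantum_entanglement_alt (packages : List Int) (groups : Int) : Int :=
  match pvBest packages (PySem.Int.floordiv packages.sum groups) with
  | some r => r.2
  | none => 0   -- Source B raises ValueError here; outside Pre_

-- ===== PRECONDITION & SPEC =====
-- Pre_ is exactly A's halting set: groups ≠ 0 (Python raises ZeroDivisionError on 0)
-- and some nonempty subset of packages sums to sum(packages) // groups (otherwise
-- A's 'while True' never returns).
def Pre_get_quantum_entanglement (packages : List Int) (groups : Int) : Prop :=
  groups ≠ 0 ∧ ∃ l ∈ packages.sublists,
    l ≠ [] ∧ l.sum = PySem.Int.floordiv packages.sum groups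

instance (packages : List Int) (groups : Int) :
    Decidable (Pre_get_quantum_entanglement packages groups) := by
  unfold Pre_get_quantum_entanglement; infer_instance

def pvWitness_get_quantum_entanglement : List Int × Int := ([1, 2, 3, 4, 5], 3)

def Spec_get_quantum_entanglement (packages : List Int) (groups : Int) (out : Int) : Prop := out = get_quantum_entanglement_alt packages groups
instance (packages : List Int) (groups : Int) (out : Int) : Decidable (Spec_get_quantum_entanglement packages groups out) := by unfold Spec_get_quantum_entanglement; infer_instance

-- ===== CLAIM (what is proved, stated in full; the proofs are below) =====
def Claim_equal_get_quantum_entanglement : Prop := ∀ (packages : List Int) (groups : Int), Dom_get_quantum_entanglement packages groups → Pre_get_quantum_entanglement packages groups → Spec_get_quantum_entanglement packages groups (get_quantum_entanglement packages groups)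

-- ===== LEMMAS AND PROOFS =====

theorem pvFind_zero (xs : List Int) (t : Int) :
    pvFind xs 0 t = if t = 0 then some [] else none := by
  unfold pvFind pvCombos
  by_cases h : t = 0
  · subst h; rfl
  · simp only [List.find?, show ((0 : Int) == t) = false from
      beq_eq_false_iff_ne.mpr (Ne.symm h), List.sum_nil, if_neg h]

theorem pvFind_nil (k : Nat) (t : Int) : pvFind [] (k + 1) t = none := by
  simp [pvFind, pvCombos]

theorem pvFind_cons (x : Int) (xs : List Int) (k : Nat) (t : Int) :
    pvFind (x :: xs) (k + 1) t =
      match pvFind xs k (t - x) with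
      | some l => some (x :: l)
      | none => pvFind xs (k + 1) t := by
  show ((pvCombos k xs).map (fun l => x :: l) ++ pvCombos (k + 1) xs).find?
      (fun l => l.sum == t) = _
  rw [List.find?_append, List.find?_map]
  have hp : ((fun l : List Int => l.sum == t) ∘ (fun l => x :: l))
      = (fun l : List Int => l.sum == (t - x)) := by
    funext l
    by_cases h : l.sum = t - x
    · simp [h]
    · simp [h]; omega
  rw [hp]
  cases h : pvFind xs k (t - x) with
  | none => unfold pvFind at h; rw [h]; rfl
  | some l => unfold pvFind at h; rw [h]; rfl

-- membership in pvCombos = sublists of the right length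
theorem mem_pvCombos {l xs : List Int} {k : Nat} (h : l ∈ pvCombos k xs) :
    l.Sublist xs ∧ l.length = k := by
  induction xs generalizing k l with
  | nil =>
    cases k with
    | zero => simp [pvCombos] at h; simp [h]
    | succ k => simp [pvCombos] at h
  | cons x xs ih =>
    cases k with
    | zero => simp [pvCombos] at h; simp [h, List.nil_sublist]
    | succ k =>
      rcases List.mem_append.mp h with hm | hm
      · obtain ⟨l', hl', rfl⟩ := List.mem_map.mp hm
        obtain ⟨hs, hlen⟩ := ih hl'
        exact ⟨hs.cons₂ x, by simp [hlen]⟩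
      · obtain ⟨hs, hlen⟩ := ih hm
        exact ⟨hs.cons x, hlen⟩

theorem sublist_mem_pvCombos {l xs : List Int} (h : l.Sublist xs) :
    l ∈ pvCombos l.length xs := by
  induction h with
  | slnil => simp [pvCombos]
  | @cons l₁ l₂ a h ih =>
    cases l₁ with
    | nil => simp [pvCombos]
    | cons y l' =>
      simp only [List.length_cons, pvCombos]
      exact List.mem_append_right _ ih
  | @cons₂ l₁ l₂ a h ih =>
    simp only [List.length_cons, pvCombos]
    exact List.mem_append_left _ (List.mem_map.mpr ⟨_, ih, rfl⟩)

-- the characterization of pvBest in terms of pvFind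
theorem pvBest_char (xs : List Int) (t : Int) :
    (pvBest xs t = none → ∀ j, 1 ≤ j → pvFind xs j t = none) ∧
    (∀ k p, pvBest xs t = some (k, p) →
      1 ≤ k ∧ (∀ j, 1 ≤ j → j < k → pvFind xs j t = none) ∧
      ∃ l, pvFind xs k t = some l ∧ l.prod = p) := by
  induction xs generalizing t with
  | nil =>
    refine ⟨fun _ j hj => ?_, fun k p h => by simp [pvBest] at h⟩
    cases j with
    | zero => omega
    | succ j => exact pvFind_nil j t
  | cons x xs ih =>
    by_cases hx : t = x
    · -- the head alone matches: the result is always some (1, x)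
      subst hx
      have hres : pvBest (t :: xs) t = some (1, t) := by
        cases hbo : pvBest xs t with
        | none => simp [pvBest, hbo]
        | some b =>
          obtain ⟨hb1, -, -⟩ := (ih t).2 b.1 b.2 (by rw [hbo])
          simp [pvBest, hbo, hb1]
      refine ⟨fun h => absurd (hres ▸ h) (by simp), fun k p h => ?_⟩
      rw [hres] at h
      injection h with h
      injection h with h1 h2
      subst h1; subst h2
      refine ⟨le_refl 1, fun j hj1 hj2 => by omega, [t], ?_, by simp⟩
      rw [pvFind_cons, show t - t = 0 from sub_self t, pvFind_zero]
      simp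
    · -- head ≠ target: combine the with-head and without-head recursions
      have ht0 : ¬(t - x = 0) := fun h => hx (by omega)
      cases hw : pvBest xs (t - x) with
      | none =>
        -- no subset of the tail completes the head
        have hleft : ∀ m, pvFind xs m (t - x) = none := by
          intro m
          cases m with
          | zero => rw [pvFind_zero, if_neg ht0]
          | succ m => exact (ih (t - x)).1 hw (m + 1) (by omega)
        have hstep : ∀ m, pvFind (x :: xs) (m + 1) t = pvFind xs (m + 1) t := by
          intro m; rw [pvFind_cons, hleft m]
        have hres : pvBest (x :: xs) t = pvBest xs t := by
          cases hbo : pvBest xs t <;> simp [pvBest, hx, hw, hbo]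
        constructor
        · intro h j hj1
          rw [hres] at h
          obtain ⟨m, rfl⟩ : ∃ m, j = m + 1 := ⟨j - 1, by omega⟩
          rw [hstep m]
          exact (ih t).1 h (m + 1) hj1
        · intro k p h
          rw [hres] at h
          obtain ⟨hk1, hmin, l, hfl, hpl⟩ := (ih t).2 k p h
          refine ⟨hk1, fun j hj1 hj2 => ?_, l, ?_, hpl⟩
          · obtain ⟨m, rfl⟩ : ∃ m, j = m + 1 := ⟨j - 1, by omega⟩
            rw [hstep m]; exact hmin (m + 1) hj1 hj2
          · obtain ⟨m, rfl⟩ : ∃ m, k = m + 1 := ⟨k - 1, by omega⟩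
            rw [hstep m]; exact hfl
      | some a =>
        obtain ⟨s, q⟩ := a
        obtain ⟨hs1, hamin, la, hfa, hpa⟩ := (ih (t - x)).2 s q (by rw [hw])
        have hleftlow : ∀ m, m < s → pvFind xs m (t - x) = none := by
          intro m hm
          cases m with
          | zero => rw [pvFind_zero, if_neg ht0]
          | succ m => exact hamin (m + 1) (by omega) hm
        have hstep : ∀ m, m < s → pvFind (x :: xs) (m + 1) t = pvFind xs (m + 1) t := by
          intro m hm; rw [pvFind_cons, hleftlow m hm]
        have hfcons : pvFind (x :: xs) (s + 1) t = some (x :: la) := by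
          rw [pvFind_cons, hfa]
        cases hbo : pvBest xs t with
        | none =>
          have hnob : ∀ j, 1 ≤ j → pvFind xs j t = none := (ih t).1 hbo
          have hres : pvBest (x :: xs) t = some (s + 1, x * q) := by
            simp [pvBest, hx, hw, hbo]
          refine ⟨fun h => absurd (hres ▸ h) (by simp), fun k p h => ?_⟩
          rw [hres] at h
          injection h with h
          injection h with h1 h2
          subst h1; subst h2
          refine ⟨by omega, fun j hj1 hj2 => ?_, x :: la, hfcons, by simp [hpa]⟩
          obtain ⟨m, rfl⟩ : ∃ m, j = m + 1 := ⟨j - 1, by omega⟩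
          rw [hstep m (by omega)]
          exact hnob (m + 1) hj1
        | some b =>
          obtain ⟨sb, qb⟩ := b
          obtain ⟨hb1, hbmin, lb, hfb, hpb⟩ := (ih t).2 sb qb (by rw [hbo])
          by_cases hle : s + 1 ≤ sb
          · have hres : pvBest (x :: xs) t = some (s + 1, x * q) := by
              simp [pvBest, hx, hw, hbo, hle]
            refine ⟨fun h => absurd (hres ▸ h) (by simp), fun k p h => ?_⟩
            rw [hres] at h
            injection h with h
            injection h with h1 h2
            subst h1; subst h2
            refine ⟨by omega, fun j hj1 hj2 => ?_, x :: la, hfcons, by simp [hpa]⟩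
            obtain ⟨m, rfl⟩ : ∃ m, j = m + 1 := ⟨j - 1, by omega⟩
            rw [hstep m (by omega)]
            exact hbmin (m + 1) hj1 (by omega)
          · have hres : pvBest (x :: xs) t = some (sb, qb) := by
              simp [pvBest, hx, hw, hbo, hle]
            refine ⟨fun h => absurd (hres ▸ h) (by simp), fun k p h => ?_⟩
            rw [hres] at h
            injection h with h
            injection h with h1 h2
            subst h1; subst h2
            refine ⟨hb1, fun j hj1 hj2 => ?_, lb, ?_, hpb⟩
            · obtain ⟨m, rfl⟩ : ∃ m, j = m + 1 := ⟨j - 1, by omega⟩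
              rw [hstep m (by omega)]
              exact hbmin (m + 1) hj1 hj2
            · obtain ⟨m, rfl⟩ : ∃ m, sb = m + 1 := ⟨sb - 1, by omega⟩
              rw [hstep m (by omega)]
              exact hfb

theorem pvLoopA_eq (xs : List Int) (t : Int) (k : Nat) (l : List Int)
    (hfind : pvFind xs k t = some l)
    (hmin : ∀ j, 1 ≤ j → j < k → pvFind xs j t = none) :
    ∀ fuel size, 1 ≤ size → size ≤ k → k < size + fuel →
      pvLoopA xs t fuel size = l.prod := by
  intro fuel
  induction fuel with
  | zero => intro size _ h1 h2; omega
  | succ fuel ihf =>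
    intro size hs1 hsk hkf
    by_cases heq : size = k
    · subst heq
      simp only [pvLoopA, hfind]
    · have : pvFind xs size t = none := hmin size hs1 (by omega)
      simp only [pvLoopA, this]
      exact ihf (size + 1) (by omega) (by omega) (by omega)

-- ===== VERDICT (by name: the statement is the Claim_ definition above) =====
theorem get_quantum_entanglement_spec : Claim_equal_get_quantum_entanglement := by
  intro packages groups _hdom hpre
  obtain ⟨-, l, hmem, hne, hsum⟩ := hpre
  set t := PySem.Int.floordiv packages.sum groups with ht
  have hsub : l.Sublist packages := List.mem_sublists.mp hmem
  have hlmem : l ∈ pvCombos l.length packages := sublist_mem_pvCombos hsub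
  have hlen1 : 1 ≤ l.length := by cases l with | nil => exact absurd rfl hne | cons y l' => simp
  have hfind_ne : pvFind packages l.length t ≠ none := by
    intro h
    unfold pvFind at h
    rw [List.find?_eq_none] at h
    exact (by simpa [hsum] using h l hlmem)
  have hbest_ne : pvBest packages t ≠ none := fun h =>
    hfind_ne ((pvBest_char packages t).1 h l.length hlen1)
  cases hbo : pvBest packages t with
  | none => exact absurd hbo hbest_ne
  | some kp =>
    obtain ⟨k, p⟩ := kp
    obtain ⟨hk1, hmin, lw, hfw, hpw⟩ := (pvBest_char packages t).2 k p hbo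
    have hk_le : k ≤ packages.length := by
      have hmemw : lw ∈ pvCombos k packages := by
        unfold pvFind at hfw
        exact List.mem_of_find?_eq_some hfw
      obtain ⟨hs, hl⟩ := mem_pvCombos hmemw
      rw [← hl]
      exact hs.length_le
    unfold Spec_get_quantum_entanglement get_quantum_entanglement get_quantum_entanglement_alt
    rw [← ht, hbo,
      pvLoopA_eq packages t k lw hfw hmin packages.length 1 (le_refl 1) hk1 (by omega)]
    exact hpw
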